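-- pv_equiv track=rewrite | github.com/aman-bcalm/Scaler-Problems | Day 11/PatternPrinting2.py | solve
-- ===== SOURCE A (Python) =====
-- def solve(A):
--
--     res = []
--     for i in range(1, A+1):
--         res_i = []
--         for j in range(1,i+1):
--              res_i.append(j)
--         for j in range(0,A-i):
--             res_i.append(0)
--         res_i.reverse()
--         res.append(res_i)
--     return res
-- ===== SOURCE B (Python) =====
-- def solve(A):
--     return [[A - j if i + j >= A else 0 for j in range(A)] for i in range(1, A + 1)]
-- ===== Notes on version B (the rewrite author's own statement) =====
-- stated objective: simpler
-- what changed: Each cell is computed directly by the closed-form conditional A-j if i+j>=A else 0 in a single comprehension, replacing A's build-ascending-then-pad-zeros-then-reverse row construction.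
import Mathlib
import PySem

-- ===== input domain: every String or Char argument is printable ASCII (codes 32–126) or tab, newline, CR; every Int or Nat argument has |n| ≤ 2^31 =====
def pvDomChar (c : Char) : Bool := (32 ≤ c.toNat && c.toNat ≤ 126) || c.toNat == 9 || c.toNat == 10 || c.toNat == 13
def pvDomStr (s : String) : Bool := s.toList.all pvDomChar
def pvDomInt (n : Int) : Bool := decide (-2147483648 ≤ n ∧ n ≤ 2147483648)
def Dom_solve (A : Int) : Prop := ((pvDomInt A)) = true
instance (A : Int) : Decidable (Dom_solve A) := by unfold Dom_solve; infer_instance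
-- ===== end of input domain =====

-- B computes each cell by the closed-form conditional (A-j if i+j>=A else 0) instead of
-- A's build-ascending / pad-zeros / reverse row construction; same O(A^2) cost, simpler.

-- ===== PORT A =====
def solve (A : Int) : List (List Int) :=
  (PySem.List.pyRange 1 (A+1) 1).foldl (fun res i =>
    let r1 := (PySem.List.pyRange 1 (i+1) 1).foldl (fun r j => r ++ [j]) ([] : List Int)
    let r2 := (PySem.List.pyRange 0 (A-i) 1).foldl (fun r _ => r ++ [(0:Int)]) r1
    res ++ [r2.reverse]) []

-- ===== PORT B =====
def solve_alt (A : Int) : List (List Int) :=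
  (PySem.List.pyRange 1 (A+1) 1).map (fun i =>
    (PySem.List.pyRange 0 A 1).map (fun j => if i + j ≥ A then A - j else 0))

-- ===== PRECONDITION & SPEC =====
def Spec_solve (A : Int) (out : List (List Int)) : Prop := out = solve_alt A
instance (A : Int) (out : List (List Int)) : Decidable (Spec_solve A out) := by unfold Spec_solve; infer_instance

-- ===== CLAIM (what is proved, stated in full; the proofs are below) =====
def Claim_equal_solve : Prop := ∀ (A : Int), Dom_solve A → Spec_solve A (solve A)

-- ===== LEMMAS AND PROOFS =====

-- A's row for i (ascending 1..i, then A-i zeros, reversed) equals B's closed-form row.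
theorem row_eq (A i : Int) (h1 : 1 ≤ i) (h2 : i ≤ A) :
    (((PySem.List.pyRange 1 (i+1) 1) ++
      (PySem.List.pyRange 0 (A-i) 1).map (fun _ => (0:Int))).reverse)
    = (PySem.List.pyRange 0 A 1).map (fun j => if i + j ≥ A then A - j else 0) := by
  rw [PySem.List.pyRange_one_append 0 (A-i) A (by omega) (by omega), List.map_append,
      List.reverse_append]
  congr 1
  · -- zero part: both are constant-0 lists of length (A-i)
    have hz : (PySem.List.pyRange 0 (A-i) 1).map
        (fun j => if i + j ≥ A then A - j else 0) =
        (PySem.List.pyRange 0 (A-i) 1).map (fun _ => (0:Int)) := by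
      apply List.map_congr_left
      intro j hj
      rw [PySem.List.mem_pyRange_one] at hj
      simp only [ge_iff_le, if_neg (by omega : ¬ A ≤ i + j)]
    rw [hz, ← List.map_reverse]
    simp [List.map_const']
  · -- descending part: reverse of [1..i] equals A-j over [A-i..A)
    rw [show (PySem.List.pyRange 1 (i+1) 1) = PySem.List.pyRange (0+1) (i+1) 1 by norm_num,
        ← PySem.List.pyRange_neg_one_eq_reverse, PySem.List.pyRange_neg_one,
        PySem.List.pyRange_one]
    have hlen : (A - (A - i)).toNat = i.toNat := by omega
    rw [show ((i:Int)-0).toNat = i.toNat by omega, hlen, List.map_map]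
    apply List.map_congr_left
    intro k hk
    simp only [Function.comp]
    rw [if_pos (by omega : i + ((A - i) + (k:Int)) ≥ A)]
    omega

-- ===== VERDICT (by name: the statement is the Claim_ definition above) =====
theorem solve_spec : Claim_equal_solve := by
  intro A _
  unfold Spec_solve solve solve_alt
  simp only [PySem.List.foldl_append_singleton_eq_self,
    PySem.List.foldl_append_singleton_eq_map, List.nil_append]
  apply List.map_congr_left
  intro i hi
  rw [PySem.List.mem_pyRange_one] at hi
  exact row_eq A i hi.1 (by omega)
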